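-- pv_equiv track=rewrite | github.com/muhammad06hassan/cockpit-user-audit | audit_refactor.py | format_user_change
-- ===== SOURCE A (Python) =====
-- from typing import Any, Dict, List, Optional, Set, Tuple
--
-- def format_user_change(change: Dict, profile_map_old: Dict[str, str], profile_map_new: Dict[str, str]) -> Dict:
--     """
--     Convert profile ID changes to profile names for readability.
--     - old ID is looked up in profile_map_old (baseline) first, then fallback to profile_map_new, then raw id
--     - new ID is looked up in profile_map_new (current) first, then fallback to profile_map_old, then raw id
--     """
--     formatted = {}
--     for key, val in change.items():
--         if key == "profile":
--             old_id = val.get("old")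
--             new_id = val.get("new")
--
--             # old → baseline first
--             if old_id is not None:
--                 old_name = profile_map_old.get(old_id) or profile_map_new.get(old_id) or old_id
--             else:
--                 old_name = old_id
--
--             # new → current first
--             if new_id is not None:
--                 new_name = profile_map_new.get(new_id) or profile_map_old.get(new_id) or new_id
--             else:
--                 new_name = new_id
--
--             formatted[key] = {"old": old_name, "new": new_name}
--         else:
--             formatted[key] = val
--     return formatted
-- ===== SOURCE B (Python) =====
-- def _resolution_table(primary, secondary):
--     """Collapse the two-level name fallback into one lookup table: start from the
--     fallback map's truthy entries, then overlay the primary map's truthy entries."""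
--     table = {k: v for k, v in secondary.items() if v}
--     table.update((k, v) for k, v in primary.items() if v)
--     return table
--
--
-- def format_user_change(change, profile_map_old, profile_map_new):
--     formatted = dict(change)
--     prof = formatted.get("profile")
--     if prof is not None:
--         to_old = _resolution_table(profile_map_old, profile_map_new)
--         to_new = _resolution_table(profile_map_new, profile_map_old)
--         old_id = prof.get("old")
--         new_id = prof.get("new")
--         formatted["profile"] = {
--             "old": old_id if old_id is None else to_old.get(old_id, old_id),
--             "new": new_id if new_id is None else to_new.get(new_id, new_id),
--         }
--     return formatted
-- ===== Notes on version B (the rewrite author's own statement) =====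
-- stated objective: alternative
-- what changed: A loops over the dict rebuilding it entry by entry and resolves each profile id with a per-id two-map or-fallback chain; B makes one bulk shallow copy, precomputes two merged resolution tables (fallback map's truthy entries overlaid by the primary map's truthy entries) and resolves each id with a single .get with the id as default; Pre_ only excludes association lists with duplicate keys in the profile maps, which no Python dict can encode.
import Mathlib
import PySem

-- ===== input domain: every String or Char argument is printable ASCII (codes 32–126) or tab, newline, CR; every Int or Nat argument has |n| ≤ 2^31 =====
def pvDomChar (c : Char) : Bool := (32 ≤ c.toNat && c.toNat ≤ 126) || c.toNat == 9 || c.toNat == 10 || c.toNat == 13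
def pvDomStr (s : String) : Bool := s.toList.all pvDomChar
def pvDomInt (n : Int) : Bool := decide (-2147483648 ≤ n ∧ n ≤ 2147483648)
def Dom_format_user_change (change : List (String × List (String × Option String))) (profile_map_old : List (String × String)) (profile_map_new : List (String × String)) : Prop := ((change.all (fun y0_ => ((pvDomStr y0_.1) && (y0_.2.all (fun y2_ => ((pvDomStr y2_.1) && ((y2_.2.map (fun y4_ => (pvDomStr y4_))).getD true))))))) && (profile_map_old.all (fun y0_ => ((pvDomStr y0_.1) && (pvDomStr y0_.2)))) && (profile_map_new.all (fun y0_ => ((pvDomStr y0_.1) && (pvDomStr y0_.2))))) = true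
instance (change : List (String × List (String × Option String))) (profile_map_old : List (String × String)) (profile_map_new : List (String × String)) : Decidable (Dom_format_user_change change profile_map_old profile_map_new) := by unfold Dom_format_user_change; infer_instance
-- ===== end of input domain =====

-- B replaces A's per-entry rebuild loop and per-id two-map or-fallback chains by a bulk shallow
-- copy plus two precomputed merged resolution tables queried with a single get-with-default
-- (objective: alternative; same cost, return value only).

-- ===== PORT A =====
-- Literal transliteration of A: formatted = {}; for key, val in change.items(): ... formatted[key] = ...
-- 'x or y' on Optional[str] keeps x only when it is a non-empty string (Python truthiness).
def format_user_change (change : List (String × List (String × Option String))) (profile_map_old : List (String × String)) (profile_map_new : List (String × String)) : List (String × List (String × Option String)) :=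
  (change.foldl
    (fun (formatted : PySem.Dict String (List (String × Option String))) kv =>
      if kv.1 == "profile" then
        let val : PySem.Dict String (Option String) := PySem.Dict.mk kv.2
        let old_id : Option String := val.getD "old" none
        let new_id : Option String := val.getD "new" none
        let old_name : Option String :=
          match old_id with
          | some oid =>
            let a := (PySem.Dict.mk profile_map_old).get? oid
            if a.any (fun s => !(s == "")) then a
            else
              let b := (PySem.Dict.mk profile_map_new).get? oid
              if b.any (fun s => !(s == "")) then b else some oid
          | none => none
        let new_name : Option String :=
          match new_id with
          | some nid =>
            let a := (PySem.Dict.mk profile_map_new).get? nid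
            if a.any (fun s => !(s == "")) then a
            else
              let b := (PySem.Dict.mk profile_map_old).get? nid
              if b.any (fun s => !(s == "")) then b else some nid
          | none => none
        formatted.insert kv.1 [("old", old_name), ("new", new_name)]
      else
        formatted.insert kv.1 kv.2)
    PySem.Dict.empty).items

-- ===== PORT B =====
-- _resolution_table(primary, secondary): {k: v for k, v in secondary.items() if v} then
-- table.update((k, v) for k, v in primary.items() if v) — comprehension/update = insert folds.
def fucTable (primary secondary : List (String × String)) : PySem.Dict String String :=
  let table := (secondary.filter (fun kv => !(kv.2 == ""))).foldl
      (fun d kv => d.insert kv.1 kv.2) PySem.Dict.empty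
  (primary.filter (fun kv => !(kv.2 == ""))).foldl (fun d kv => d.insert kv.1 kv.2) table

-- formatted = dict(change); prof = formatted.get("profile"); if prof is not None:
--   build both tables, then one .get(id, id) per id; return formatted
def format_user_change_alt (change : List (String × List (String × Option String))) (profile_map_old : List (String × String)) (profile_map_new : List (String × String)) : List (String × List (String × Option String)) :=
  let formatted := PySem.Dict.ofList change
  match formatted.get? "profile" with
  | none => formatted.items
  | some prof =>
    let to_old := fucTable profile_map_old profile_map_new
    let to_new := fucTable profile_map_new profile_map_old
    let old_id : Option String := (PySem.Dict.mk prof).getD "old" none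
    let new_id : Option String := (PySem.Dict.mk prof).getD "new" none
    (formatted.insert "profile"
      [("old", match old_id with | none => none | some p => some (to_old.getD p p)),
       ("new", match new_id with | none => none | some p => some (to_new.getD p p))]).items

-- ===== PRECONDITION & SPEC =====
-- Pre_ excludes only profile-map association lists with duplicate keys: those encode no Python
-- dict (a dict cannot hold a key twice), and there first-match lookup and B's table would differ.
def Pre_format_user_change (change : List (String × List (String × Option String))) (profile_map_old : List (String × String)) (profile_map_new : List (String × String)) : Prop :=
  (profile_map_old.map Prod.fst).Nodup ∧ (profile_map_new.map Prod.fst).Nodup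
instance (change : List (String × List (String × Option String))) (profile_map_old : List (String × String)) (profile_map_new : List (String × String)) : Decidable (Pre_format_user_change change profile_map_old profile_map_new) := by unfold Pre_format_user_change; infer_instance

def pvWitness_format_user_change : (List (String × List (String × Option String))) × (List (String × String)) × (List (String × String)) :=
  ([("profile", [("old", some "p1"), ("new", some "p2")]), ("role", [("old", some "a")])],
   [("p1", "Baseline")], [("p2", "Current")])

def Spec_format_user_change (change : List (String × List (String × Option String))) (profile_map_old : List (String × String)) (profile_map_new : List (String × String)) (out : List (String × List (String × Option String))) : Prop := out = format_user_change_alt change profile_map_old profile_map_new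
instance (change : List (String × List (String × Option String))) (profile_map_old : List (String × String)) (profile_map_new : List (String × String)) (out : List (String × List (String × Option String))) : Decidable (Spec_format_user_change change profile_map_old profile_map_new out) := by unfold Spec_format_user_change; infer_instance

-- ===== CLAIM (what is proved, stated in full; the proofs are below) =====
def Claim_equal_format_user_change : Prop := ∀ (change : List (String × List (String × Option String))) (profile_map_old : List (String × String)) (profile_map_new : List (String × String)), Dom_format_user_change change profile_map_old profile_map_new → Pre_format_user_change change profile_map_old profile_map_new → Spec_format_user_change change profile_map_old profile_map_new (format_user_change change profile_map_old profile_map_new)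

-- ===== LEMMAS AND PROOFS =====

-- A's per-id fallback chain, as a function (proof helper only)
def fucChain (primary secondary : List (String × String)) (pid : Option String) : Option String :=
  match pid with
  | none => none
  | some p =>
    let a := (PySem.Dict.mk primary).get? p
    if a.any (fun s => !(s == "")) then a
    else
      let b := (PySem.Dict.mk secondary).get? p
      if b.any (fun s => !(s == "")) then b else some p

-- the value A stores for a key
def fucG (pmo pmn : List (String × String)) (k : String) (v : List (String × Option String)) : List (String × Option String) :=
  if k == "profile" then
    [("old", fucChain pmo pmn ((PySem.Dict.mk v).getD "old" none)),
     ("new", fucChain pmn pmo ((PySem.Dict.mk v).getD "new" none))]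
  else v

def fucMapG (pmo pmn : List (String × String)) (l : List (String × List (String × Option String))) : List (String × List (String × Option String)) :=
  l.map (fun kv => (kv.1, fucG pmo pmn kv.1 kv.2))

-- A's loop body stores exactly fucG of the entry
lemma fucStep (pmo pmn : List (String × String)) (d : PySem.Dict String (List (String × Option String))) (kv : String × List (String × Option String)) :
    (if kv.1 == "profile" then
        let val : PySem.Dict String (Option String) := PySem.Dict.mk kv.2
        let old_id : Option String := val.getD "old" none
        let new_id : Option String := val.getD "new" none
        let old_name : Option String :=
          match old_id with
          | some oid =>
            let a := (PySem.Dict.mk pmo).get? oid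
            if a.any (fun s => !(s == "")) then a
            else
              let b := (PySem.Dict.mk pmn).get? oid
              if b.any (fun s => !(s == "")) then b else some oid
          | none => none
        let new_name : Option String :=
          match new_id with
          | some nid =>
            let a := (PySem.Dict.mk pmn).get? nid
            if a.any (fun s => !(s == "")) then a
            else
              let b := (PySem.Dict.mk pmo).get? nid
              if b.any (fun s => !(s == "")) then b else some nid
          | none => none
        d.insert kv.1 [("old", old_name), ("new", new_name)]
      else d.insert kv.1 kv.2)
    = d.insert kv.1 (fucG pmo pmn kv.1 kv.2) := by
  by_cases h : kv.1 == "profile"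
  · simp only [h, if_true, fucG, fucChain]
    cases h1 : (PySem.Dict.mk kv.2).getD "old" none <;>
      cases h2 : (PySem.Dict.mk kv.2).getD "new" none <;> rfl
  · simp [h, fucG]

-- insert commutes with the key-preserving value map fucMapG
lemma fucInsertMapG (pmo pmn : List (String × String)) (l : List (String × List (String × Option String))) (k : String) (v : List (String × Option String)) :
    (PySem.Dict.mk (fucMapG pmo pmn l)).insert k (fucG pmo pmn k v)
      = PySem.Dict.mk (fucMapG pmo pmn ((PySem.Dict.mk l).insert k v).items) := by
  have hc : (PySem.Dict.mk (fucMapG pmo pmn l)).contains k = (PySem.Dict.mk l).contains k := by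
    simp [PySem.Dict.contains, fucMapG, List.any_map, Function.comp_def]
  by_cases h : (PySem.Dict.mk l).contains k
  · simp only [PySem.Dict.insert, hc, h, if_true]
    congr 1
    simp only [fucMapG, List.map_map]
    apply List.map_congr_left
    intro p _
    by_cases hp : p.1 = k <;> simp [hp]
  · simp only [PySem.Dict.insert, hc, h]
    simp [fucMapG]

-- the main loop invariant: A's fold = fucMapG of the raw insert fold
lemma fucFold (pmo pmn : List (String × String)) (l : List (String × List (String × Option String))) (d : List (String × List (String × Option String))) :
    l.foldl (fun acc kv => acc.insert kv.1 (fucG pmo pmn kv.1 kv.2)) (PySem.Dict.mk (fucMapG pmo pmn d))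
      = PySem.Dict.mk (fucMapG pmo pmn (l.foldl (fun acc kv => acc.insert kv.1 kv.2) (PySem.Dict.mk d)).items) := by
  induction l generalizing d with
  | nil => simp
  | cons kv t ih =>
    simp only [List.foldl_cons]
    rw [fucInsertMapG]
    have := ih (((PySem.Dict.mk d).insert kv.1 kv.2).items)
    simpa using this

-- get? hit implies contains
lemma fucContains {ν : Type} (d : PySem.Dict String ν) (k : String) (v : ν) (h : d.get? k = some v) : d.contains k := by
  simp only [PySem.Dict.get?, Option.map_eq_some_iff] at h
  obtain ⟨p, hp, hv⟩ := h
  simp only [PySem.Dict.contains, List.any_eq_true]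
  exact ⟨p, List.mem_of_find?_eq_some hp, by simpa using List.find?_some hp⟩

-- with nodup keys, fucMapG is a single conditional override of the "profile" entry
lemma fucFinal (pmo pmn : List (String × String)) (l : List (String × List (String × Option String))) (hnd : (PySem.Dict.mk l).keys.Nodup) :
    fucMapG pmo pmn l
      = match (PySem.Dict.mk l).get? "profile" with
        | none => l
        | some prof => ((PySem.Dict.mk l).insert "profile" (fucG pmo pmn "profile" prof)).items := by
  induction l with
  | nil => simp [fucMapG, PySem.Dict.get?]
  | cons kv t ih =>
    obtain ⟨k0, v0⟩ := kv
    have hndk : (List.map (fun x : String × List (String × Option String) => x.1) ((k0, v0) :: t)).Nodup := hnd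
    rw [List.map_cons] at hndk
    have hnd0 := List.nodup_cons.mp hndk
    have htne : ∀ p ∈ t, k0 = "profile" → ¬ p.1 = "profile" := by
      intro p hp hk hcontra
      apply hnd0.1
      rw [hk]
      exact List.mem_map.mpr ⟨p, hp, hcontra⟩
    by_cases h : k0 == "profile"
    · have hk : k0 = "profile" := by simpa using h
      have hcont : (PySem.Dict.mk ((k0, v0) :: t)).contains "profile" := by
        simp [PySem.Dict.contains, hk]
      have htail : ∀ p ∈ t, p.1 ≠ "profile" := fun p hp => htne p hp hk
      simp only [PySem.Dict.get?_mk_cons, h, if_true]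
      simp only [PySem.Dict.insert, hcont, if_true]
      simp only [fucMapG, List.map_cons, hk]
      refine List.cons_eq_cons.mpr ⟨by simp, ?_⟩
      calc t.map (fun p => (p.1, fucG pmo pmn p.1 p.2))
            = t.map id := List.map_congr_left (fun p hp => by have := htail p hp; simp [fucG, this])
          _ = t := List.map_id t
          _ = t.map id := (List.map_id t).symm
          _ = t.map (fun p => if p.1 == "profile" then ("profile", fucG pmo pmn "profile" v0) else p) :=
            (List.map_congr_left (fun p hp => by have := htail p hp; simp [this])).symm
    · have hk : ¬ k0 = "profile" := by simpa using h
      simp only [PySem.Dict.get?_mk_cons, h]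
      have ihx := ih hnd0.2
      cases hget : (PySem.Dict.mk t).get? "profile" with
      | none =>
        simp only [hget] at ihx
        simp only [fucMapG, List.map_cons, fucG, h] at ihx ⊢
        exact congrArg _ ihx
      | some prof =>
        simp only [hget] at ihx
        have hcont : (PySem.Dict.mk t).contains "profile" := fucContains _ _ _ hget
        have hcont' : (PySem.Dict.mk ((k0, v0) :: t)).contains "profile" := by
          simp only [PySem.Dict.contains, List.any_cons, Bool.or_eq_true]
          exact Or.inr (by simpa [PySem.Dict.contains] using hcont)
        simp only [PySem.Dict.insert, hcont, hcont', if_true] at ihx ⊢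
        simp only [fucMapG, List.map_cons, fucG, h] at ihx ⊢
        exact congrArg _ ihx

-- a filtered insert fold, over a nodup-key list, looks up like the list with falsy entries masked
lemma fucFoldGet (l : List (String × String)) (d : PySem.Dict String String) (k : String)
    (hnd : (l.map Prod.fst).Nodup) :
    ((l.filter (fun kv => !(kv.2 == ""))).foldl (fun d kv => d.insert kv.1 kv.2) d).get? k
      = match (PySem.Dict.mk l).get? k with
        | some v => if v == "" then d.get? k else some v
        | none => d.get? k := by
  induction l generalizing d with
  | nil => simp [PySem.Dict.get?]
  | cons kv t ih =>
    obtain ⟨a, b⟩ := kv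
    rw [List.map_cons] at hnd
    have hnd0 := List.nodup_cons.mp hnd
    by_cases hb : b == ""
    · have hb' : b = "" := by simpa using hb
      simp only [List.filter_cons, hb', show (!("" : String) == "") = false by decide,
        Bool.false_eq_true, if_false]
      rw [ih d hnd0.2]
      rw [PySem.Dict.get?_mk_cons]
      by_cases hk : a == k
      · have hak : a = k := by simpa using hk
        have : (PySem.Dict.mk t).get? k = none := by
          rw [PySem.Dict.get?_eq_none_iff_not_mem_keys]
          intro hmem
          exact hnd0.1 (by simpa [hak] using hmem)
        simp [hk, this]
      · simp [hk]
    · have hbt : (!(b == "")) = true := by simp [hb]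
      simp only [List.filter_cons, hbt, if_true, List.foldl_cons]
      rw [ih (d.insert a b) hnd0.2]
      rw [PySem.Dict.get?_mk_cons]
      by_cases hk : a == k
      · have hak : a = k := by simpa using hk
        have : (PySem.Dict.mk t).get? k = none := by
          rw [PySem.Dict.get?_eq_none_iff_not_mem_keys]
          intro hmem
          exact hnd0.1 (by simpa [hak] using hmem)
        simp [this, hb, hak, PySem.Dict.get?_insert_self]
      · have hak : ¬ (k = a) := fun hh => hk (by simp [hh])
        simp only [PySem.Dict.get?_insert_of_ne d b hak, hk, Bool.false_eq_true, if_false]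

-- under nodup keys the merged table's get-with-default equals A's fallback chain
lemma fucTableChain (pri sec : List (String × String)) (p : String)
    (h1 : (pri.map Prod.fst).Nodup) (h2 : (sec.map Prod.fst).Nodup) :
    some ((fucTable pri sec).getD p p) = fucChain pri sec (some p) := by
  unfold fucTable fucChain
  rw [PySem.Dict.getD_eq_get?_getD]
  rw [fucFoldGet pri _ p h1, fucFoldGet sec _ p h2]
  cases ha : (PySem.Dict.mk pri).get? p with
  | some v =>
    by_cases hv : v == ""
    · cases hb : (PySem.Dict.mk sec).get? p with
      | some w =>
        by_cases hw : w == "" <;> simp [ha, hb, hv, hw, PySem.Dict.get?_empty]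
      | none => simp [ha, hb, hv, PySem.Dict.get?_empty]
    · simp [ha, hv]
  | none =>
    cases hb : (PySem.Dict.mk sec).get? p with
    | some w =>
      by_cases hw : w == "" <;> simp [ha, hb, hw, PySem.Dict.get?_empty]
    | none => simp [ha, hb, PySem.Dict.get?_empty]

-- ===== VERDICT (by name: the statement is the Claim_ definition above) =====
theorem format_user_change_spec : Claim_equal_format_user_change := by
  intro change pmo pmn _ hpre
  obtain ⟨h1, h2⟩ := hpre
  unfold Spec_format_user_change format_user_change format_user_change_alt
  have hF : (fun (formatted : PySem.Dict String (List (String × Option String))) (kv : String × List (String × Option String)) =>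
      if kv.1 == "profile" then
        let val : PySem.Dict String (Option String) := PySem.Dict.mk kv.2
        let old_id : Option String := val.getD "old" none
        let new_id : Option String := val.getD "new" none
        let old_name : Option String :=
          match old_id with
          | some oid =>
            let a := (PySem.Dict.mk pmo).get? oid
            if a.any (fun s => !(s == "")) then a
            else
              let b := (PySem.Dict.mk pmn).get? oid
              if b.any (fun s => !(s == "")) then b else some oid
          | none => none
        let new_name : Option String :=
          match new_id with
          | some nid =>
            let a := (PySem.Dict.mk pmn).get? nid
            if a.any (fun s => !(s == "")) then a
            else
              let b := (PySem.Dict.mk pmo).get? nid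
              if b.any (fun s => !(s == "")) then b else some nid
          | none => none
        formatted.insert kv.1 [("old", old_name), ("new", new_name)]
      else
        formatted.insert kv.1 kv.2)
      = fun acc kv => acc.insert kv.1 (fucG pmo pmn kv.1 kv.2) :=
    funext fun d => funext fun kv => fucStep pmo pmn d kv
  rw [hF]
  have h0 : (change.foldl (fun acc kv => acc.insert kv.1 (fucG pmo pmn kv.1 kv.2)) PySem.Dict.empty)
      = PySem.Dict.mk (fucMapG pmo pmn (PySem.Dict.ofList change).items) := fucFold pmo pmn change []
  rw [h0]
  show fucMapG pmo pmn (PySem.Dict.ofList change).items = _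
  rw [fucFinal pmo pmn (PySem.Dict.ofList change).items (PySem.Dict.nodup_keys_ofList change)]
  cases hget : (PySem.Dict.ofList change).get? "profile" with
  | none => simp [hget]
  | some prof =>
    have hlist : fucG pmo pmn "profile" prof
        = [("old", match (PySem.Dict.mk prof).getD "old" none with
                   | none => none | some p => some ((fucTable pmo pmn).getD p p)),
           ("new", match (PySem.Dict.mk prof).getD "new" none with
                   | none => none | some q => some ((fucTable pmn pmo).getD q q))] := by
      simp only [fucG, beq_self_eq_true, if_true]
      cases ho : (PySem.Dict.mk prof).getD "old" none with
      | none =>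
        cases hn : (PySem.Dict.mk prof).getD "new" none with
        | none => rfl
        | some q => simp [fucChain, fucTableChain pmn pmo q h2 h1]
      | some p =>
        cases hn : (PySem.Dict.mk prof).getD "new" none with
        | none => simp [fucChain, fucTableChain pmo pmn p h1 h2]
        | some q => simp [fucChain, fucTableChain pmo pmn p h1 h2, fucTableChain pmn pmo q h2 h1]
    simp [hget, hlist]
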